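-- pv_equiv track=rewrite | github.com/cianc/AoC2025 | day10.py | buttons_set_jolts
-- ===== SOURCE A (Python) =====
-- from typing import List, Tuple
--
-- def buttons_set_jolts(bitmap_buttons: List[int], target_jolts: List[int], jolts_set: set) -> bool:
--     bitmap_button_mask = 0
--     for button in bitmap_buttons:
--         bitmap_button_mask |= button
--
--     for jolt_idx in range(len(target_jolts)):
--         if not bitmap_button_mask & (1 << jolt_idx):
--             return False
--         button_sum = 0
--         for button in bitmap_buttons:
--             if button & (1 << jolt_idx):
--                 button_sum += 1
--         if button_sum != target_jolts[jolt_idx]: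
--             return False
--
--     return True
-- ===== SOURCE B (Python) =====
-- from typing import List, Tuple
--
-- def buttons_set_jolts(bitmap_buttons: List[int], target_jolts: List[int], jolts_set: set) -> bool:
--     n = len(target_jolts)
--     counts = [0] * n
--     for button in bitmap_buttons:
--         x = button
--         for idx in range(n):
--             if x & 1:
--                 counts[idx] += 1
--             x >>= 1
--     for idx in range(n):
--         if counts[idx] == 0 or counts[idx] != target_jolts[idx]:
--             return False
--     return True
-- ===== Notes on version B (the rewrite author's own statement) =====
-- stated objective: alternative
-- what changed: A rescans the whole button list once per jolt index (plus a precomputed OR-mask for coverage); B makes one pass over the buttons, walking each button's low bits into a per-index count table, then a single checking pass that rejects an index with count 0 (coverage) or count != target.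
import Mathlib
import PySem

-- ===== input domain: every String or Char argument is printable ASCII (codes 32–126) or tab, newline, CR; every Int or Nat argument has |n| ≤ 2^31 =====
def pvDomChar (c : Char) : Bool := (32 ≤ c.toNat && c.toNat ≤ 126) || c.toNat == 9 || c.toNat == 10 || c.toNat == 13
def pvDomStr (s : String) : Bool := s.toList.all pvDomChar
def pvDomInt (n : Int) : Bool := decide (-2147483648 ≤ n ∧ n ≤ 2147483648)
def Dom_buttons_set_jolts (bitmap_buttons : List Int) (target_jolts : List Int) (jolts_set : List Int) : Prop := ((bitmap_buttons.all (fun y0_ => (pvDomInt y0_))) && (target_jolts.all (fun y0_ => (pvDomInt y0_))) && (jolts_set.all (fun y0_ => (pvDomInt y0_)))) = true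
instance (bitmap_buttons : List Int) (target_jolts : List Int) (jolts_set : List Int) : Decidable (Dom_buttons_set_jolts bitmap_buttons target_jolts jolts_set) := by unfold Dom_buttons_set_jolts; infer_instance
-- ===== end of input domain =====

-- B replaces A's per-index rescans of the button list by a one-pass per-bit count table; objective: alternative decomposition.
-- ===== PORT A =====
-- inner 'for button in bitmap_buttons' counting loop of A, at bit position i
def pvSumFold (bitmap_buttons : List Int) (i : Nat) : Int :=
  bitmap_buttons.foldl (fun acc b => if PySem.Int.band b ((1:Int) <<< i) ≠ 0 then acc + 1 else acc) 0

-- A's 'for jolt_idx in range(len(target_jolts))' loop with its early returns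
def pvALoop (bitmap_buttons : List Int) (target_jolts : List Int) (mask : Int) : List Nat → Bool
  | [] => true
  | i :: rest =>
    if PySem.Int.band mask ((1:Int) <<< i) = 0 then false
    else if pvSumFold bitmap_buttons i ≠ target_jolts.getD i 0 then false
    else pvALoop bitmap_buttons target_jolts mask rest

-- target_jolts[jolt_idx] is always in range (jolt_idx ∈ range(len(target_jolts))), so getD is exact
def buttons_set_jolts (bitmap_buttons : List Int) (target_jolts : List Int) (jolts_set : List Int) : Bool :=
  let mask := bitmap_buttons.foldl (fun m b => PySem.Int.bor m b) 0
  pvALoop bitmap_buttons target_jolts mask (List.range target_jolts.length)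

-- ===== PORT B =====
-- one button's bounded bit-walk over the counts table: test the low bit, shift right
def pvAddBits : Int → List Int → List Int
  | _, [] => []
  | x, c :: rest => (if PySem.Int.band x 1 ≠ 0 then c + 1 else c) :: pvAddBits (x >>> (1:Nat)) rest

-- B's checking pass; counts always has length len(target_jolts)
def pvCheck : List Int → List Int → Bool
  | c :: cs, t :: ts => if c = 0 ∨ c ≠ t then false else pvCheck cs ts
  | _, _ => true

def buttons_set_jolts_alt (bitmap_buttons : List Int) (target_jolts : List Int) (jolts_set : List Int) : Bool :=
  pvCheck (bitmap_buttons.foldl (fun cs b => pvAddBits b cs) (List.replicate target_jolts.length 0)) target_jolts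

-- ===== PRECONDITION & SPEC =====
def Spec_buttons_set_jolts (bitmap_buttons : List Int) (target_jolts : List Int) (jolts_set : List Int) (out : Bool) : Prop := out = buttons_set_jolts_alt bitmap_buttons target_jolts jolts_set
instance (bitmap_buttons : List Int) (target_jolts : List Int) (jolts_set : List Int) (out : Bool) : Decidable (Spec_buttons_set_jolts bitmap_buttons target_jolts jolts_set out) := by unfold Spec_buttons_set_jolts; infer_instance

-- ===== CLAIM (what is proved, stated in full; the proofs are below) =====
def Claim_equal_buttons_set_jolts : Prop := ∀ (bitmap_buttons : List Int) (target_jolts : List Int) (jolts_set : List Int), Dom_buttons_set_jolts bitmap_buttons target_jolts jolts_set → Spec_buttons_set_jolts bitmap_buttons target_jolts jolts_set (buttons_set_jolts bitmap_buttons target_jolts jolts_set)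

-- ===== LEMMAS AND PROOFS =====

theorem pv_and_add_ldiff (n : Nat) : ∀ m, (n &&& m) + Nat.ldiff n m = n := by
  induction n using Nat.binaryRec with
  | zero => intro m; simp [Nat.ldiff]
  | bit b n ih =>
    intro m
    rw [← Nat.bit_testBit_zero_shiftRight_one m, Nat.land_bit, Nat.ldiff_bit]
    rw [Nat.bit_val, Nat.bit_val, Nat.bit_val]
    have := ih (m >>> 1)
    cases b <;> cases hm : m.testBit 0 <;>
      simp only [Bool.true_and, Bool.false_and, Bool.not_true, Bool.not_false,
        Bool.toNat_true, Bool.toNat_false] <;> omega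

theorem pv_sub_and_eq_ldiff (n m : Nat) : n - (n &&& m) = Nat.ldiff n m := by
  have h := pv_and_add_ldiff n m
  omega

theorem pv_negSucc_ofNat (k : Nat) : -((k:Nat):Int) - 1 = Int.negSucc k := by
  simp only [Int.negSucc_eq]; ring

theorem pv_bor_testBit (a b : Int) (i : Nat) :
    (PySem.Int.bor a b).testBit i = (a.testBit i || b.testBit i) := by
  rw [PySem.Int.bor.eq_1]
  cases a with
  | ofNat m =>
    cases b with
    | ofNat n =>
      have pm : (0:Int) ≤ Int.ofNat m := Int.natCast_nonneg m
      have pn : (0:Int) ≤ Int.ofNat n := Int.natCast_nonneg n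
      rw [if_pos pm, if_pos pn]
      show (Int.ofNat _).testBit i = _
      simp [Int.testBit]
    | negSucc n =>
      have pm : (0:Int) ≤ Int.ofNat m := Int.natCast_nonneg m
      rw [if_pos pm, if_neg (show ¬ (0:Int) ≤ Int.negSucc n by simp only [Int.negSucc_eq]; omega)]
      have hn : (-(Int.negSucc n) - 1).toNat = n := by simp only [Int.negSucc_eq]; omega
      have hm : (Int.ofNat m).toNat = m := rfl
      rw [hn, hm, pv_sub_and_eq_ldiff, pv_negSucc_ofNat]
      simp only [Int.testBit, Nat.testBit_ldiff]
      cases m.testBit i <;> cases n.testBit i <;> rfl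
  | negSucc m =>
    have ha : ¬ (0:Int) ≤ Int.negSucc m := by simp only [Int.negSucc_eq]; omega
    have hm : (-(Int.negSucc m) - 1).toNat = m := by simp only [Int.negSucc_eq]; omega
    cases b with
    | ofNat n =>
      have pn : (0:Int) ≤ Int.ofNat n := Int.natCast_nonneg n
      rw [if_neg ha, if_pos pn]
      have hn : (Int.ofNat n).toNat = n := rfl
      rw [hm, hn, pv_sub_and_eq_ldiff, pv_negSucc_ofNat]
      simp only [Int.testBit, Nat.testBit_ldiff]
      cases m.testBit i <;> cases n.testBit i <;> rfl
    | negSucc n =>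
      rw [if_neg ha, if_neg (show ¬ (0:Int) ≤ Int.negSucc n by simp only [Int.negSucc_eq]; omega)]
      have hn : (-(Int.negSucc n) - 1).toNat = n := by simp only [Int.negSucc_eq]; omega
      rw [hm, hn, pv_negSucc_ofNat]
      simp only [Int.testBit, Nat.testBit_land]
      cases m.testBit i <;> cases n.testBit i <;> rfl

theorem pv_band_two_pow (x : Int) (i : Nat) :
    PySem.Int.band x ((1:Int) <<< i) = if x.testBit i then (1:Int) <<< i else 0 := by
  have h1 : (1:Int) <<< i = ((2^i : Nat) : Int) := by
    rw [Int.shiftLeft_eq]; push_cast; ring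
  rw [h1, PySem.Int.band.eq_1]
  cases x with
  | ofNat n =>
    have h0 : (0:Int) ≤ Int.ofNat n := Int.natCast_nonneg n
    have h2 : (0:Int) ≤ ((2^i:Nat):Int) := by positivity
    rw [if_pos h0, if_pos h2]
    have e1 : (Int.ofNat n).toNat = n := rfl
    have e2 : (((2^i:Nat):Int)).toNat = 2^i := by omega
    rw [e1, e2, Nat.and_two_pow]
    simp only [Int.testBit]
    rcases Bool.eq_false_or_eq_true (n.testBit i) with hb | hb <;> simp [hb]
  | negSucc m =>
    have h0 : ¬ (0:Int) ≤ Int.negSucc m := by simp only [Int.negSucc_eq]; omega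
    have h2 : (0:Int) ≤ ((2^i:Nat):Int) := by positivity
    rw [if_neg h0, if_pos h2]
    have hm : (-(Int.negSucc m) - 1).toNat = m := by
      simp only [Int.negSucc_eq]; omega
    have h3 : (((2^i:Nat):Int)).toNat = 2^i := by omega
    rw [hm, h3, Nat.land_comm, Nat.and_two_pow]
    simp only [Int.testBit]
    rcases Bool.eq_false_or_eq_true (m.testBit i) with hb | hb <;> simp [hb]

theorem pv_shiftLeft_ne (i : Nat) : ((1:Int) <<< i) ≠ 0 := by
  rw [Int.shiftLeft_eq]; positivity

theorem pv_band_two_pow_ne (x : Int) (i : Nat) :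
    (PySem.Int.band x ((1:Int) <<< i) ≠ 0) ↔ x.testBit i = true := by
  rw [pv_band_two_pow]
  rcases Bool.eq_false_or_eq_true (x.testBit i) with hb | hb <;>
    simp [hb, pv_shiftLeft_ne i]

theorem pv_band_one_ne (x : Int) :
    (PySem.Int.band x 1 ≠ 0) ↔ x.testBit 0 = true := by
  have h : (1:Int) = (1:Int) <<< (0:Nat) := rfl
  rw [h]; exact pv_band_two_pow_ne x 0

theorem pv_shiftRight_testBit (x : Int) (i : Nat) :
    (x >>> (1:Nat)).testBit i = x.testBit (i+1) := by
  cases x with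
  | ofNat n =>
    show (Int.ofNat (n >>> 1)).testBit i = _
    simp only [Int.testBit, Nat.testBit_shiftRight, Nat.add_comm]
  | negSucc m =>
    show (Int.negSucc (m >>> 1)).testBit i = _
    simp only [Int.testBit, Nat.testBit_shiftRight, Nat.add_comm]

theorem pv_mask_testBit (bb : List Int) (z : Int) (i : Nat) :
    (bb.foldl (fun m b => PySem.Int.bor m b) z).testBit i
      = (z.testBit i || bb.any (fun b => b.testBit i)) := by
  induction bb generalizing z with
  | nil => simp
  | cons b l ih => simp [List.foldl_cons, ih, pv_bor_testBit, Bool.or_assoc]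

theorem pv_fold_count (i : Nat) (l : List Int) : ∀ acc : Int,
    l.foldl (fun acc b => if PySem.Int.band b ((1:Int) <<< i) ≠ 0 then acc + 1 else acc) acc
      = acc + (l.countP (fun b => b.testBit i) : Int) := by
  induction l with
  | nil => intro acc; simp
  | cons b l ih =>
    intro acc
    simp only [List.foldl_cons, List.countP_cons, ih]
    by_cases hb : b.testBit i = true
    · rw [if_pos ((pv_band_two_pow_ne b i).mpr hb)]
      simp [hb]; ring
    · rw [if_neg (by simp only [Ne, not_not]; rw [pv_band_two_pow]; simp [hb])]
      simp [hb]

theorem pv_addBits_length (x : Int) (cs : List Int) : (pvAddBits x cs).length = cs.length := by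
  induction cs generalizing x with
  | nil => rfl
  | cons c rest ih => simp [pvAddBits, ih]

theorem pv_addBits_getD (cs : List Int) : ∀ (x : Int) (i : Nat), i < cs.length →
    (pvAddBits x cs).getD i 0 = cs.getD i 0 + (if x.testBit i then (1:Int) else 0) := by
  induction cs with
  | nil => intro x i h; simp at h
  | cons c rest ih =>
    intro x i h
    cases i with
    | zero =>
      simp only [pvAddBits, List.getD_cons_zero]
      by_cases hb : x.testBit 0 = true
      · rw [if_pos ((pv_band_one_ne x).mpr hb)]; simp [hb]
      · rw [if_neg (by simp only [Ne, not_not]; have h1 : (1:Int) = (1:Int) <<< (0:Nat) := rfl; rw [h1, pv_band_two_pow]; simp [hb])]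
        simp [hb]
    | succ i =>
      simp only [pvAddBits, List.getD_cons_succ]
      rw [ih (x >>> (1:Nat)) i (by simpa using h), pv_shiftRight_testBit]

theorem pv_counts_length (bb : List Int) : ∀ cs : List Int,
    (bb.foldl (fun cs b => pvAddBits b cs) cs).length = cs.length := by
  induction bb with
  | nil => intro cs; rfl
  | cons b l ih => intro cs; simp [List.foldl_cons, ih, pv_addBits_length]

theorem pv_counts_getD (bb : List Int) : ∀ (cs : List Int) (i : Nat), i < cs.length →
    (bb.foldl (fun cs b => pvAddBits b cs) cs).getD i 0
      = cs.getD i 0 + (bb.countP (fun b => b.testBit i) : Int) := by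
  induction bb with
  | nil => intro cs i h; simp
  | cons b l ih =>
    intro cs i h
    simp only [List.foldl_cons, List.countP_cons]
    rw [ih (pvAddBits b cs) i (by rw [pv_addBits_length]; exact h),
        pv_addBits_getD cs b i h]
    by_cases hb : b.testBit i = true
    · simp [hb]; ring
    · simp [hb]

theorem pv_check_iff (ts : List Int) : ∀ cs : List Int, cs.length = ts.length →
    (pvCheck cs ts = true ↔ ∀ i, i < ts.length → (cs.getD i 0 ≠ 0 ∧ cs.getD i 0 = ts.getD i 0)) := by
  induction ts with
  | nil => intro cs h; rw [List.length_nil, List.length_eq_zero_iff] at h; subst h; simp [pvCheck]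
  | cons t ts ih =>
    intro cs h
    cases cs with
    | nil => simp at h
    | cons c cs =>
      simp only [pvCheck]
      by_cases hc : c = 0 ∨ c ≠ t
      · rw [if_pos hc]
        constructor
        · intro hf; exact absurd hf (by simp)
        · intro hall
          have h0 := hall 0 (by simp)
          simp only [List.getD_cons_zero] at h0
          rcases hc with hc | hc
          · exact (h0.1 hc).elim
          · exact (hc h0.2).elim
      · rw [if_neg hc]
        rw [not_or, not_not] at hc
        rw [ih cs (by simpa using h)]
        constructor
        · intro hall i hi
          cases i with
          | zero => simpa using hc
          | succ i => simpa using hall i (by simp at hi; omega)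
        · intro hall i hi
          have := hall (i+1) (by simpa using hi)
          simpa using this

theorem pv_aloop_iff (bb tj : List Int) (mask : Int) (l : List Nat) :
    pvALoop bb tj mask l = true ↔
      ∀ i ∈ l, (PySem.Int.band mask ((1:Int) <<< i) ≠ 0 ∧ pvSumFold bb i = tj.getD i 0) := by
  induction l with
  | nil => simp [pvALoop]
  | cons i rest ih =>
    simp only [pvALoop]
    by_cases h1 : PySem.Int.band mask ((1:Int) <<< i) = 0
    · rw [if_pos h1]; simp [h1]
    · rw [if_neg h1]
      by_cases h2 : pvSumFold bb i ≠ tj.getD i 0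
      · rw [if_pos h2]
        simp only [Bool.false_eq_true, false_iff]
        intro hall
        exact h2 (hall i (by simp)).2
      · rw [if_neg h2]
        rw [not_not] at h2
        rw [ih]
        simp [h1, h2]

theorem pv_sumFold_eq (bb : List Int) (i : Nat) :
    pvSumFold bb i = (bb.countP (fun b => b.testBit i) : Int) := by
  unfold pvSumFold
  rw [pv_fold_count]
  ring

theorem pv_countP_ne (bb : List Int) (i : Nat) :
    ((bb.countP (fun b => b.testBit i) : Int) ≠ 0) ↔ (∃ b ∈ bb, b.testBit i = true) := by
  rw [← List.countP_pos_iff]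
  constructor
  · intro h; omega
  · intro h; omega

theorem pv_A_iff (bb tj js : List Int) :
    buttons_set_jolts bb tj js = true ↔
      ∀ i, i < tj.length → ((bb.countP (fun b => b.testBit i) : Int) ≠ 0 ∧
        (bb.countP (fun b => b.testBit i) : Int) = tj.getD i 0) := by
  show pvALoop bb tj _ _ = true ↔ _
  rw [pv_aloop_iff]
  simp only [List.mem_range]
  refine forall_congr' (fun i => imp_congr_right (fun _ => and_congr ?_ ?_))
  · rw [pv_band_two_pow_ne, pv_mask_testBit, pv_countP_ne]
    have h0 : (0:Int).testBit i = false := Nat.zero_testBit i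
    rw [h0, Bool.false_or, List.any_eq_true]
  · rw [pv_sumFold_eq]

theorem pv_B_iff (bb tj js : List Int) :
    buttons_set_jolts_alt bb tj js = true ↔
      ∀ i, i < tj.length → ((bb.countP (fun b => b.testBit i) : Int) ≠ 0 ∧
        (bb.countP (fun b => b.testBit i) : Int) = tj.getD i 0) := by
  show pvCheck _ _ = true ↔ _
  rw [pv_check_iff tj _ (by rw [pv_counts_length]; simp)]
  refine forall_congr' (fun i => imp_congr_right (fun hi => ?_))
  rw [pv_counts_getD bb _ i (by simpa using hi), List.getD_replicate (0:Int) hi, zero_add]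

-- ===== VERDICT (by name: the statement is the Claim_ definition above) =====
theorem buttons_set_jolts_spec : Claim_equal_buttons_set_jolts := by
  intro bb tj js _
  unfold Spec_buttons_set_jolts
  exact Bool.eq_iff_iff.mpr ((pv_A_iff bb tj js).trans (pv_B_iff bb tj js).symm)
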